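-- pv_equiv track=rewrite | github.com/tvrusso/zamgrh_translator | src/translator.py | collapse_repeated_pronouns
-- ===== SOURCE A (Python) =====
-- def assert_word_list(words, label="words"):
--     assert isinstance(words, list), f"{label} must be a list, got {type(words).__name__}"
--     assert all(isinstance(w, str) for w in words), f"{label} must contain only strings"
--     assert all(w is not None for w in words), f"{label} must not contain None"
--     assert all(w != "" for w in words), f"{label} must not contain empty-string words"
--
-- def assert_unknown_word_shape(words, label="words"):
--     for w in words:
--         if w.startswith("["):
--             assert w.endswith("]"), f"{label} contains malformed unknown word: {w}"
--
-- def validate_pipeline_step_result(words, label):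
--     assert_word_list(words, label)
--     assert_unknown_word_shape(words, label)
--
-- def collapse_repeated_pronouns(words, lookup, eng_lookup, tokens):
--     """
--     Owns: cleanup of repeated adjacent pronouns.
--
--     Guarantees:
--     - collapses repeated 'I' / 'me'
--     - leaves non-pronoun repetition alone
--     """
--     assert_word_list(words, "collapse_repeated_pronouns input")
--     result = []
--     prev = None
--
--     for w in words:
--         if w == prev and w in {"I", "me", "my"}:
--             continue
--         result.append(w)
--         prev = w
--
--     validate_pipeline_step_result(result, "collapse_repeated_pronouns output")
--     return result, tokens
-- ===== SOURCE B (Python) =====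
-- def assert_word_list(words, label="words"):
--     assert isinstance(words, list), f"{label} must be a list, got {type(words).__name__}"
--     assert all(isinstance(w, str) for w in words), f"{label} must contain only strings"
--     assert all(w is not None for w in words), f"{label} must not contain None"
--     assert all(w != "" for w in words), f"{label} must not contain empty-string words"
--
-- def assert_unknown_word_shape(words, label="words"):
--     for w in words:
--         if w.startswith("["):
--             assert w.endswith("]"), f"{label} contains malformed unknown word: {w}"
--
-- def validate_pipeline_step_result(words, label):
--     assert_word_list(words, label)
--     assert_unknown_word_shape(words, label)
--
-- def collapse_repeated_pronouns(words, lookup, eng_lookup, tokens):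
--     assert_word_list(words, "collapse_repeated_pronouns input")
--     # Run-based decomposition: walk maximal runs of consecutive equal words;
--     # a pronoun run contributes its key once, any other run is kept in full.
--     result = []
--     i = 0
--     n = len(words)
--     while i < n:
--         j = i + 1
--         while j < n and words[j] == words[i]:
--             j += 1
--         if words[i] in {"I", "me", "my"}:
--             result.append(words[i])
--         else:
--             result.extend(words[i:j])
--         i = j
--     validate_pipeline_step_result(result, "collapse_repeated_pronouns output")
--     return result, tokens
-- ===== Notes on version B (the rewrite author's own statement) =====
-- stated objective: alternative
-- what changed: Replaces the prev-tracking per-word filter with a run-based traversal: the list is scanned as maximal runs of consecutive equal words, a pronoun run emits its key once and any other run is copied whole.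
import Mathlib
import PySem

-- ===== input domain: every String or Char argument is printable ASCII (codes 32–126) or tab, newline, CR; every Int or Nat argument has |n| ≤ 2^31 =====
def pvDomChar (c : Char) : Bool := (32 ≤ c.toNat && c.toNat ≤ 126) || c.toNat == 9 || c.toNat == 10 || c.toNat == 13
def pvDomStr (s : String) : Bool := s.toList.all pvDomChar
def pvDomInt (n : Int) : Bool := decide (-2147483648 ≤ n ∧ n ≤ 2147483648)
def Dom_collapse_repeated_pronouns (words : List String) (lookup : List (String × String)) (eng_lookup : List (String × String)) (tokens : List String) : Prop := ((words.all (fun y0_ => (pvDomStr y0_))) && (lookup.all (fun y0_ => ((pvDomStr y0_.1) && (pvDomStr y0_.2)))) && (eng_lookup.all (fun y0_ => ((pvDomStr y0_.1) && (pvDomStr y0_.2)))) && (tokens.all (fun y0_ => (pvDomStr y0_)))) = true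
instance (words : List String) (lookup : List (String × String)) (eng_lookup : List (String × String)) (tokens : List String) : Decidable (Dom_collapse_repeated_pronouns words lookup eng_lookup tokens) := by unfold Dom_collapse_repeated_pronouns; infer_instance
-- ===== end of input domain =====

-- B replaces A's prev-tracking per-word loop with a run-based traversal (maximal runs of equal
-- consecutive words; a pronoun run emits its key once, other runs are copied whole); same cost.

-- ===== PORT A =====
-- membership test 'w in {"I", "me", "my"}'
def pronA (w : String) : Bool := w == "I" || w == "me" || w == "my"

-- The asserts of assert_word_list / validate_pipeline_step_result succeed on every input
-- admitted by Pre_ below (the result's words are drawn from the input), so the port computes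
-- the loop directly: result/prev accumulator over words, then (result, tokens).
def collapse_repeated_pronouns (words : List String) (lookup : List (String × String)) (eng_lookup : List (String × String)) (tokens : List String) : List String × List String :=
  let st := words.foldl
    (fun (acc : List String × Option String) w =>
      if some w == acc.2 && pronA w then acc else (acc.1 ++ [w], some w))
    ([], none)
  (st.1, tokens)

-- ===== PORT B =====
def pronB (w : String) : Bool := ["I", "me", "my"].contains w

-- Source B's run scanner: the inner 'while words[j] == words[i]' is takeWhile/dropWhile on the tail,
-- a pronoun run contributes [w], any other run is copied whole, then continue past the run.
def goB : List String → List String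
  | [] => []
  | w :: ws =>
    (if pronB w then [w] else w :: ws.takeWhile (· == w)) ++ goB (ws.dropWhile (· == w))
termination_by ws => ws.length
decreasing_by
  exact Nat.lt_succ_of_le (List.Sublist.length_le (List.dropWhile_sublist _))

-- same asserts as A, which succeed on every input admitted by Pre_ below
def collapse_repeated_pronouns_alt (words : List String) (lookup : List (String × String)) (eng_lookup : List (String × String)) (tokens : List String) : List String × List String :=
  (goB words, tokens)

-- ===== PRECONDITION & SPEC =====
-- Pre_ excludes exactly the inputs on which the Python A raises AssertionError:
-- an empty-string word, or a word starting with '[' that does not end with ']'.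
def Pre_collapse_repeated_pronouns (words : List String) (lookup : List (String × String)) (eng_lookup : List (String × String)) (tokens : List String) : Prop :=
  ∀ w ∈ words, w ≠ "" ∧ (PySem.Str.startswith w "[" = true → PySem.Str.endswith w "]" = true)
instance (words : List String) (lookup : List (String × String)) (eng_lookup : List (String × String)) (tokens : List String) : Decidable (Pre_collapse_repeated_pronouns words lookup eng_lookup tokens) := by unfold Pre_collapse_repeated_pronouns; infer_instance

def pvWitness_collapse_repeated_pronouns : List String × (List (String × String)) × (List (String × String)) × List String :=
  (["I", "I", "me", "dog", "dog", "[x]"], [], [], ["t1", "t2"])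

def Spec_collapse_repeated_pronouns (words : List String) (lookup : List (String × String)) (eng_lookup : List (String × String)) (tokens : List String) (out : List String × List String) : Prop := out = collapse_repeated_pronouns_alt words lookup eng_lookup tokens
instance (words : List String) (lookup : List (String × String)) (eng_lookup : List (String × String)) (tokens : List String) (out : List String × List String) : Decidable (Spec_collapse_repeated_pronouns words lookup eng_lookup tokens out) := by unfold Spec_collapse_repeated_pronouns; infer_instance

-- ===== CLAIM (what is proved, stated in full; the proofs are below) =====
def Claim_equal_collapse_repeated_pronouns : Prop := ∀ (words : List String) (lookup : List (String × String)) (eng_lookup : List (String × String)) (tokens : List String), Dom_collapse_repeated_pronouns words lookup eng_lookup tokens → Pre_collapse_repeated_pronouns words lookup eng_lookup tokens → Spec_collapse_repeated_pronouns words lookup eng_lookup tokens (collapse_repeated_pronouns words lookup eng_lookup tokens)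

-- ===== LEMMAS AND PROOFS =====

theorem pronB_eq_pronA (w : String) : pronB w = pronA w := by
  simp only [pronA, pronB, List.contains_cons, List.contains_nil, Bool.or_false, Bool.or_assoc]

-- A's loop, as a structural recursion on the word list (result component only).
def goA (prev : Option String) : List String → List String
  | [] => []
  | w :: ws => if some w == prev && pronA w then goA prev ws else w :: goA (some w) ws

theorem foldA_eq (ws : List String) : ∀ (res : List String) (prev : Option String),
    (ws.foldl
      (fun (acc : List String × Option String) w =>
        if some w == acc.2 && pronA w then acc else (acc.1 ++ [w], some w))
      (res, prev)).1 = res ++ goA prev ws := by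
  induction ws with
  | nil => intro res prev; simp [goA]
  | cons w ws ih =>
    intro res prev
    rw [List.foldl_cons]
    by_cases h : (some w == prev && pronA w) = true
    · rw [if_pos h, ih, goA, if_pos h]
    · rw [if_neg h, ih, goA, if_neg h, List.append_assoc]
      rfl

-- A's loop consumes a maximal run exactly as B emits it
theorem goA_run (w : String) (ws : List String) :
    goA (some w) ws
      = (if pronA w then [] else ws.takeWhile (· == w)) ++ goA none (ws.dropWhile (· == w)) := by
  induction ws with
  | nil => simp [goA]
  | cons r rs ih =>
    by_cases hr : r = w
    · subst hr
      rw [List.takeWhile_cons_of_pos (by simp), List.dropWhile_cons_of_pos (by simp)]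
      by_cases hp : pronA r = true
      · rw [goA, if_pos (by simp [hp]), ih, if_pos hp, if_pos hp]
      · have hp' : pronA r = false := Bool.eq_false_iff.mpr hp
        rw [goA, if_neg (by simp [hp]), ih, if_neg hp, if_neg hp]
        rfl
    · rw [List.takeWhile_cons_of_neg (by simp [hr]), List.dropWhile_cons_of_neg (by simp [hr]),
        ite_self, List.nil_append, goA, if_neg (by simp [hr]), goA, if_neg (by simp)]

theorem goB_eq_goA_aux : ∀ (n : Nat) (ws : List String), ws.length ≤ n → goB ws = goA none ws := by
  intro n
  induction n with
  | zero =>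
    intro ws h
    rw [List.length_eq_zero_iff.mp (Nat.le_zero.mp h)]
    unfold goB
    rfl
  | succ n ih =>
    intro ws h
    cases ws with
    | nil => unfold goB; rfl
    | cons w ws =>
      have hlen : (ws.dropWhile (· == w)).length ≤ n :=
        le_trans (List.Sublist.length_le (List.dropWhile_sublist _)) (Nat.lt_succ_iff.mp h)
      unfold goB
      rw [ih _ hlen, goA, if_neg (show ¬((some w == (none : Option String) && pronA w) = true) by simp),
        goA_run, pronB_eq_pronA]
      by_cases hp : pronA w = true
      · rw [if_pos hp, if_pos hp]
        rfl
      · rw [if_neg hp, if_neg hp]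
        rfl

theorem goB_eq_goA (ws : List String) : goB ws = goA none ws :=
  goB_eq_goA_aux ws.length ws le_rfl

-- ===== VERDICT (by name: the statement is the Claim_ definition above) =====
theorem collapse_repeated_pronouns_spec : Claim_equal_collapse_repeated_pronouns := by
  intro words lookup eng_lookup tokens _ _
  show ((words.foldl
      (fun (acc : List String × Option String) w =>
        if some w == acc.2 && pronA w then acc else (acc.1 ++ [w], some w)) ([], none)).1, tokens)
    = (goB words, tokens)
  rw [foldA_eq, List.nil_append, goB_eq_goA]
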